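-- pv_equiv track=rewrite | github.com/Souvik-Halder/Anamika_Java_Codes | Oops/hi.py | max_planks
-- ===== SOURCE A (Python) =====
-- def max_planks(wood):
--     # Count the occurrences of each wood length
--     length_count = {}
--
--     # Count individual pieces
--     for length in wood:
--         if length in length_count:
--             length_count[length] += 1
--         else:
--             length_count[length] = 1
--
--     max_count = 0  # To keep track of the maximum number of planks
--
--     # Check for all possible plank lengths
--     for length in length_count:
--         count = length_count[length]  # Number of pieces of this length
--
--         # Check for combinations of two pieces
--         used_pairs = set()  # To avoid double counting pairs
--         for i in range(len(wood)):
--             for j in range(i + 1, len(wood)):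
--                 combined_length = wood[i] + wood[j]
--                 if combined_length == length:
--                     pair = (min(wood[i], wood[j]), max(wood[i], wood[j]))
--                     if pair not in used_pairs:
--                         count += 1
--                         used_pairs.add(pair)
--
--         # Update the maximum count if needed
--         max_count = max(max_count, count)
--
--     return max_count
-- ===== SOURCE B (Python) =====
-- def max_planks(wood):
--     # Count occurrences of each length
--     cnt = {}
--     for x in wood:
--         cnt[x] = cnt.get(x, 0) + 1
--     vals = list(cnt)
--     n = len(vals)
--     # For every achievable pair-sum, count the distinct value pairs producing it
--     pair_sums = {}
--     for i in range(n):
--         a = vals[i]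
--         if cnt[a] >= 2:
--             pair_sums[2 * a] = pair_sums.get(2 * a, 0) + 1
--         for j in range(i + 1, n):
--             s = a + vals[j]
--             pair_sums[s] = pair_sums.get(s, 0) + 1
--     best = 0
--     for L in vals:
--         best = max(best, cnt[L] + pair_sums.get(L, 0))
--     return best
-- ===== Notes on version B (the rewrite author's own statement) =====
-- stated objective: faster
-- what changed: Instead of re-scanning all O(n^2) index pairs of wood once per distinct length, B builds a single dict mapping each pair-sum of distinct values (plus doubled values of count>=2) to its distinct-pair count, then does one lookup per length.
import Mathlib
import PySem

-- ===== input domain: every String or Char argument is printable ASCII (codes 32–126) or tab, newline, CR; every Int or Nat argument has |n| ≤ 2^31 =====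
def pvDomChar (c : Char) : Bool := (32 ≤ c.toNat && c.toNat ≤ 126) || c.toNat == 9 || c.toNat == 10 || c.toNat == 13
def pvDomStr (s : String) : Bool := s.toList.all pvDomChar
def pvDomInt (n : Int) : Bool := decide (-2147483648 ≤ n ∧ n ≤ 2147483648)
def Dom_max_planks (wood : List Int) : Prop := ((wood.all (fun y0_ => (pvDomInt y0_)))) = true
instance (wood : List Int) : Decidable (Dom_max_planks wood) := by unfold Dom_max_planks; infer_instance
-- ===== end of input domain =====

-- B replaces A's per-length O(n^2) index scan by one dict of pair-sum → distinct-pair counts built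
-- from the distinct values, then a single lookup per length (objective: faster).

-- ===== PORT A =====
def max_planks (wood : List Int) : Int :=
  let length_count : PySem.Dict Int Int :=
    wood.foldl (fun d length =>
      if d.contains length then d.modify length 0 (· + 1) else d.insert length 1)
      PySem.Dict.empty
  length_count.keys.foldl (fun max_count length =>
    let st :=
      (PySem.List.pyRange 0 (PySem.List.len wood)).foldl (fun st i =>
        (PySem.List.pyRange (i + 1) (PySem.List.len wood)).foldl (fun st j =>
          let combined_length := PySem.List.pyGetD wood i 0 + PySem.List.pyGetD wood j 0
          if combined_length = length then
            let pair := (min (PySem.List.pyGetD wood i 0) (PySem.List.pyGetD wood j 0),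
                         max (PySem.List.pyGetD wood i 0) (PySem.List.pyGetD wood j 0))
            if PySem.Set.contains st.2 pair then st
            else (st.1 + 1, PySem.Set.add st.2 pair)
          else st) st)
        ((length_count.getD length 0, PySem.Set.empty) : Int × PySem.Set (Int × Int))
    max max_count st.1) 0

-- ===== PORT B =====
def max_planks_alt (wood : List Int) : Int :=
  let cnt : PySem.Dict Int Int :=
    wood.foldl (fun d x => d.insert x (d.getD x 0 + 1)) PySem.Dict.empty
  let vals := cnt.keys
  let pair_sums : PySem.Dict Int Int :=
    (PySem.List.pyRange 0 (PySem.List.len vals)).foldl (fun d i =>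
      let a := PySem.List.pyGetD vals i 0
      let d := if cnt.getD a 0 ≥ 2 then d.insert (2 * a) (d.getD (2 * a) 0 + 1) else d
      (PySem.List.pyRange (i + 1) (PySem.List.len vals)).foldl (fun d j =>
        let s := a + PySem.List.pyGetD vals j 0
        d.insert s (d.getD s 0 + 1)) d)
      PySem.Dict.empty
  vals.foldl (fun best L => max best (cnt.getD L 0 + pair_sums.getD L 0)) 0

-- ===== PRECONDITION & SPEC =====
def Spec_max_planks (wood : List Int) (out : Int) : Prop := out = max_planks_alt wood
instance (wood : List Int) (out : Int) : Decidable (Spec_max_planks wood out) := by unfold Spec_max_planks; infer_instance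

-- ===== CLAIM (what is proved, stated in full; the proofs are below) =====
def Claim_equal_max_planks : Prop := ∀ (wood : List Int), Dom_max_planks wood → Spec_max_planks wood (max_planks wood)

-- ===== LEMMAS AND PROOFS =====

-- the ordered list of index pairs i < j, as value pairs
def pairsList {α : Type} : List α → List (α × α)
  | [] => []
  | x :: t => t.map (fun y => (x, y)) ++ pairsList t

-- the common shape of both double loops: per element x an opening step h, then the inner loop over the rest
def pairFold {α σ : Type} (h : σ → α → σ) (g : σ → α → α → σ) : List α → σ → σ
  | [], s => s
  | x :: t, s => pairFold h g t (t.foldl (fun st y => g st x y) (h s x))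

def keyOf (p : Int × Int) : Int × Int := (min p.1 p.2, max p.1 p.2)

def sumKeys (L : Int) (ps : List (Int × Int)) : List (Int × Int) :=
  (ps.filter (fun p => decide (p.1 + p.2 = L))).map keyOf

-- the multiset of keys B's loop increments
def bKeys (cnt : PySem.Dict Int Int) : List Int → List Int
  | [] => []
  | a :: t => (if cnt.getD a 0 ≥ 2 then [2 * a] else []) ++ t.map (a + ·) ++ bKeys cnt t

theorem fold_pyRange_drop {α σ : Type} (l : List α) (dflt : α) (g : σ → α → σ) :
    ∀ (m : Nat) (s : σ),
      (PySem.List.pyRange (↑m) (↑l.length)).foldl (fun st j => g st (PySem.List.pyGetD l j dflt)) s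
        = (l.drop m).foldl g s := by
  intro m
  induction hn : l.length - m generalizing m with
  | zero =>
    intro s
    have h1 : (l.length : Int) ≤ (m : Int) := by exact_mod_cast Nat.le_of_sub_eq_zero hn
    rw [PySem.List.pyRange_one_eq_nil h1, List.drop_eq_nil_of_le (by omega)]
    rfl
  | succ n ih =>
    intro s
    have hm : m < l.length := by omega
    have h1 : (m : Int) < (l.length : Int) := by exact_mod_cast hm
    rw [PySem.List.pyRange_one_cons h1]
    rw [List.foldl_cons]
    have h2 : ((m : Int) + 1) = ((m + 1 : Nat) : Int) := by push_cast; ring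
    rw [h2, ih (m + 1) (by omega)]
    rw [List.drop_eq_getElem_cons hm, List.foldl_cons]
    congr 1
    rw [PySem.List.pyGetD_natCast, List.getD_eq_getElem l dflt hm]

theorem fold_pyRange_pairs {α σ : Type} (l : List α) (dflt : α) (h : σ → α → σ)
    (g : σ → α → α → σ) :
    ∀ (m : Nat) (s : σ),
      (PySem.List.pyRange (↑m) (↑l.length)).foldl
        (fun st i => (PySem.List.pyRange (i + 1) (↑l.length)).foldl
          (fun st j => g st (PySem.List.pyGetD l i dflt) (PySem.List.pyGetD l j dflt)) (h st (PySem.List.pyGetD l i dflt))) s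
        = pairFold h g (l.drop m) s := by
  intro m
  induction hn : l.length - m generalizing m with
  | zero =>
    intro s
    have h1 : (l.length : Int) ≤ (m : Int) := by exact_mod_cast Nat.le_of_sub_eq_zero hn
    rw [PySem.List.pyRange_one_eq_nil h1, List.drop_eq_nil_of_le (by omega)]
    rfl
  | succ n ih =>
    intro s
    have hm : m < l.length := by omega
    have h1 : (m : Int) < (l.length : Int) := by exact_mod_cast hm
    rw [PySem.List.pyRange_one_cons h1, List.foldl_cons]
    have h2 : ((m : Int) + 1) = ((m + 1 : Nat) : Int) := by push_cast; ring
    rw [h2, ih (m + 1) (by omega)]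
    rw [List.drop_eq_getElem_cons hm]
    show pairFold h g (List.drop (m+1) l) _ = pairFold h g (l[m] :: List.drop (m+1) l) s
    rw [pairFold]
    congr 1
    rw [fold_pyRange_drop l dflt (fun st y => g st (PySem.List.pyGetD l (↑m) dflt) y) (m+1)]
    rw [PySem.List.pyGetD_natCast, List.getD_eq_getElem l dflt hm]

theorem pairFold_eq_foldl_pairsList {α σ : Type} (g : σ → α → α → σ) :
    ∀ (l : List α) (s : σ),
      pairFold (fun st _ => st) g l s = (pairsList l).foldl (fun st p => g st p.1 p.2) s := by
  intro l
  induction l with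
  | nil => intro s; rfl
  | cons x t ih =>
    intro s
    rw [pairFold, pairsList, List.foldl_append, List.foldl_map, ih]

theorem addnew (L : Int) :
    ∀ (ps : List (Int × Int)) (c : Int) (s : PySem.Set (Int × Int)),
      ps.foldl (fun st p =>
          if p.1 + p.2 = L then
            if PySem.Set.contains st.2 (min p.1 p.2, max p.1 p.2) then st
            else (st.1 + 1, PySem.Set.add st.2 (min p.1 p.2, max p.1 p.2))
          else st) (c, s)
        = (c + ((PySem.Set.update s (sumKeys L ps)).length : Int) - (s.length : Int),
           PySem.Set.update s (sumKeys L ps)) := by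
  intro ps
  induction ps with
  | nil =>
    intro c s
    simp [sumKeys, PySem.Set.update]
  | cons p t ih =>
    intro c s
    rw [List.foldl_cons]
    have hupd : ∀ K : List (Int × Int),
        PySem.Set.update s ((min p.1 p.2, max p.1 p.2) :: K)
          = PySem.Set.update (PySem.Set.add s (min p.1 p.2, max p.1 p.2)) K := fun K => rfl
    by_cases hL : p.1 + p.2 = L
    · have hk : sumKeys L (p :: t) = (min p.1 p.2, max p.1 p.2) :: sumKeys L t := by
        simp [sumKeys, hL, keyOf]
      rw [hk]
      by_cases hc : PySem.Set.contains s (min p.1 p.2, max p.1 p.2) = true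
      · have hadd : PySem.Set.add s (min p.1 p.2, max p.1 p.2) = s := by
          unfold PySem.Set.add
          rw [if_pos hc]
        simp only [hL, hc, if_true]
        rw [ih c s, hupd, hadd]
      · have hadd : PySem.Set.add s (min p.1 p.2, max p.1 p.2)
            = s ++ [(min p.1 p.2, max p.1 p.2)] := by
          unfold PySem.Set.add
          rw [if_neg hc]
        have hlen : ((PySem.Set.add s (min p.1 p.2, max p.1 p.2)).length : Int)
            = (s.length : Int) + 1 := by rw [hadd]; simp
        simp only [hL, hc, Bool.false_eq_true, if_false, if_true]
        rw [ih (c + 1) (PySem.Set.add s (min p.1 p.2, max p.1 p.2)), hupd, Prod.mk.injEq]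
        refine ⟨?_, rfl⟩
        rw [hlen]
        ring
    · have hk : sumKeys L (p :: t) = sumKeys L t := by
        simp [sumKeys, hL]
      simp only [hL, if_false]
      rw [ih c s, hk]

theorem bFold_getD (cnt : PySem.Dict Int Int) (L : Int) :
    ∀ (vals : List Int) (d : PySem.Dict Int Int),
      (pairFold (fun d a => if cnt.getD a 0 ≥ 2 then d.insert (2 * a) (d.getD (2 * a) 0 + 1) else d)
        (fun d a y => d.insert (a + y) (d.getD (a + y) 0 + 1)) vals d).getD L 0
        = d.getD L 0 + ((bKeys cnt vals).count L : Int) := by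
  intro vals
  induction vals with
  | nil => intro d; simp [pairFold, bKeys]
  | cons a t ih =>
    intro d
    rw [pairFold, ih]
    have hinner : ∀ d0 : PySem.Dict Int Int,
        (t.foldl (fun d y => d.insert (a + y) (d.getD (a + y) 0 + 1)) d0).getD L 0
          = d0.getD L 0 + ((t.map (a + ·)).count L : Int) := by
      intro d0
      have : t.foldl (fun d y => d.insert (a + y) (d.getD (a + y) 0 + 1)) d0
          = (t.map (a + ·)).foldl (fun d k => d.insert k (d.getD k 0 + 1)) d0 := by
        rw [List.foldl_map]
      rw [this, PySem.Dict.getD_foldl_insert_add_one]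
    rw [hinner]
    have hopen : (if cnt.getD a 0 ≥ 2 then d.insert (2 * a) (d.getD (2 * a) 0 + 1) else d).getD L 0
        = d.getD L 0 + (((if cnt.getD a 0 ≥ 2 then [2 * a] else []) : List Int).count L : Int) := by
      by_cases h2 : cnt.getD a 0 ≥ 2
      · rw [if_pos h2, if_pos h2, PySem.Dict.getD_insert]
        by_cases hLa : L = 2 * a
        · rw [if_pos hLa]; simp [hLa]
        · rw [if_neg hLa]; simp [List.count_singleton]
          intro h; exact absurd h.symm hLa
      · rw [if_neg h2, if_neg h2]; simp
    rw [hopen, bKeys]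
    rw [List.count_append, List.count_append]
    push_cast
    ring

theorem count_bKeys (cnt : PySem.Dict Int Int) (L : Int) :
    ∀ (vals : List Int),
      (bKeys cnt vals).count L
        = vals.countP (fun a => decide (2 * a = L) && decide (2 ≤ cnt.getD a 0))
          + (pairsList vals).countP (fun p => decide (p.1 + p.2 = L)) := by
  intro vals
  induction vals with
  | nil => simp [bKeys, pairsList]
  | cons a t ih =>
    rw [bKeys, pairsList, List.count_append, List.count_append, ih,
        List.countP_cons, List.countP_append, List.countP_map]
    have h1 : ((if cnt.getD a 0 ≥ 2 then [2 * a] else []) : List Int).count L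
        = if (decide (2 * a = L) && decide (2 ≤ cnt.getD a 0)) = true then 1 else 0 := by
      by_cases hge : cnt.getD a 0 ≥ 2 <;> by_cases hLa : 2 * a = L <;>
        simp [hge, hLa]
    have h2 : ((t.map (a + ·)).count L)
        = t.countP ((fun p => decide (p.1 + p.2 = L)) ∘ (fun y => (a, y))) := by
      rw [List.count_eq_countP, List.countP_map]
      apply List.countP_congr
      intro y _
      simp
    rw [h1, h2]
    ring

theorem mem_pairsList {α : Type} (l : List α) (p : α × α) :
    p ∈ pairsList l ↔ [p.1, p.2].Sublist l := by
  induction l with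
  | nil => simp [pairsList]
  | cons x t ih =>
    rw [pairsList, List.mem_append, ih, List.sublist_cons_iff]
    constructor
    · rintro (hm | hs)
      · obtain ⟨y, hy, hp⟩ := List.mem_map.mp hm
        exact Or.inr ⟨[p.2], by rw [← hp], by rw [← hp]; simpa using hy⟩
      · exact Or.inl hs
    · rintro (hs | ⟨r, he, hr⟩)
      · exact Or.inr hs
      · left
        have h1 : p.1 = x := by injection he
        have h2 : [p.2] = r := by injection he with _ h
        refine List.mem_map.mpr ⟨p.2, ?_, ?_⟩
        · exact List.singleton_sublist.mp (h2 ▸ hr)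
        · exact Prod.ext h1.symm rfl

theorem pairsList_nodup {α : Type} [DecidableEq α] {l : List α} (h : l.Nodup) :
    (pairsList l).Nodup := by
  induction l with
  | nil => simp [pairsList]
  | cons x t ih =>
    have hxt := (List.nodup_cons.mp h).1
    have htnd := (List.nodup_cons.mp h).2
    rw [pairsList]
    refine List.Nodup.append ?_ (ih htnd) ?_
    · exact htnd.map (fun a b hab => by injection hab)
    · intro p hp1 hp2
      obtain ⟨y, _, hpy⟩ := List.mem_map.mp hp1
      have hsub := (mem_pairsList t p).mp hp2
      have : p.1 ∈ t := hsub.subset (by simp)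
      rw [← hpy] at this
      exact hxt this

theorem pair_sublist_of_mem {α : Type} {x y : α} {l : List α} (hxy : x ≠ y)
    (hx : x ∈ l) (hy : y ∈ l) : [x, y].Sublist l ∨ [y, x].Sublist l := by
  induction l with
  | nil => simp at hx
  | cons c t ih =>
    rcases List.mem_cons.mp hx with rfl | hx'
    · have hy' : y ∈ t := by
        rcases List.mem_cons.mp hy with rfl | h
        · exact absurd rfl hxy
        · exact h
      exact Or.inl (List.cons_sublist_cons.mpr (List.singleton_sublist.mpr hy'))
    · rcases List.mem_cons.mp hy with rfl | hy'
      · exact Or.inr (List.cons_sublist_cons.mpr (List.singleton_sublist.mpr hx'))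
      · rcases ih hx' hy' with h | h
        · exact Or.inl (h.cons c)
        · exact Or.inr (h.cons c)

theorem sublist_pair_antisym {α : Type} {x y : α} {l : List α} (hnd : l.Nodup)
    (h1 : [x, y].Sublist l) (h2 : [y, x].Sublist l) : x = y := by
  induction l with
  | nil => simp at h1
  | cons c t ih =>
    have hndt := (List.nodup_cons.mp hnd).2
    have hcnott := (List.nodup_cons.mp hnd).1
    rcases List.sublist_cons_iff.mp h1 with h1t | ⟨r1, he1, hr1⟩
    · rcases List.sublist_cons_iff.mp h2 with h2t | ⟨r2, he2, hr2⟩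
      · exact ih hndt h1t h2t
      · have hyc : y = c := by injection he2
        have hyt : y ∈ t := h1t.subset (by simp)
        exact absurd (hyc ▸ hyt) hcnott
    · rcases List.sublist_cons_iff.mp h2 with h2t | ⟨r2, he2, hr2⟩
      · have hxc : x = c := by injection he1
        have hxt : x ∈ t := h2t.subset (by simp)
        exact absurd (hxc ▸ hxt) hcnott
      · have hxc : x = c := by injection he1
        have hyc : y = c := by injection he2
        exact hxc.trans hyc.symm

theorem countP_unique {α : Type} {l : List α} (hnd : l.Nodup) (p : α → Bool)
    (hp : ∀ a b, p a → p b → a = b) :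
    l.countP p = if ∃ a ∈ l, p a then 1 else 0 := by
  induction l with
  | nil => simp
  | cons c t ih =>
    have hndt := (List.nodup_cons.mp hnd).2
    have hcnott := (List.nodup_cons.mp hnd).1
    rw [List.countP_cons, ih hndt]
    by_cases hc : p c = true
    · have hnot : ¬ ∃ a ∈ t, p a := by
        rintro ⟨a, ha, hpa⟩
        exact hcnott (hp a c hpa hc ▸ ha)
      simp [hc, hnot]
    · have hiff : (∃ a ∈ c :: t, p a) ↔ (∃ a ∈ t, p a) := by
        constructor
        · rintro ⟨a, ha, hpa⟩
          rcases List.mem_cons.mp ha with rfl | h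
          · exact absurd hpa hc
          · exact ⟨a, h, hpa⟩
        · rintro ⟨a, h, hpa⟩
          exact ⟨a, by simp [h], hpa⟩
      simp only [hc, Bool.false_eq_true, if_false, Nat.add_zero]
      exact if_congr hiff.symm rfl rfl

theorem mem_sumKeys_set (wood : List Int) (L : Int) (q : Int × Int) :
    q ∈ PySem.Set.ofList (sumKeys L (pairsList wood)) ↔
      q.1 ≤ q.2 ∧ q.1 + q.2 = L ∧ ([q.1, q.2].Sublist wood ∨ [q.2, q.1].Sublist wood) := by
  rw [PySem.Set.mem_ofList]
  unfold sumKeys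
  rw [List.mem_map]
  constructor
  · rintro ⟨p, hp, hkey⟩
    rw [List.mem_filter] at hp
    obtain ⟨hmem, hsum⟩ := hp
    have hsum' : p.1 + p.2 = L := of_decide_eq_true hsum
    have hsub := (mem_pairsList wood p).mp hmem
    subst hkey
    refine ⟨min_le_max, by simp only [keyOf]; omega, ?_⟩
    rcases le_total p.1 p.2 with hle | hle
    · left
      simpa [keyOf, min_eq_left hle, max_eq_right hle] using hsub
    · right
      simpa [keyOf, min_eq_right hle, max_eq_left hle] using hsub
  · rintro ⟨hle, hsum, hor | hor⟩
    · refine ⟨(q.1, q.2), ?_, ?_⟩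
      · rw [List.mem_filter]
        exact ⟨(mem_pairsList wood (q.1, q.2)).mpr hor, by simpa using hsum⟩
      · simp [keyOf, min_eq_left hle, max_eq_right hle]
    · refine ⟨(q.2, q.1), ?_, ?_⟩
      · rw [List.mem_filter]
        refine ⟨(mem_pairsList wood (q.2, q.1)).mpr hor, by simp; omega⟩
      · simp [keyOf, min_eq_right hle, max_eq_left hle]

theorem perL (wood : List Int) (L : Int) :
    ((PySem.Set.ofList (sumKeys L (pairsList wood))).length : Int)
      = ((bKeys (PySem.Dict.counter wood) (PySem.Set.ofList wood)).count L : Int) := by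
  have hSnd : (PySem.Set.ofList (sumKeys L (pairsList wood))).Nodup := PySem.Set.nodup_ofList _
  have hvnd : (PySem.Set.ofList wood).Nodup := PySem.Set.nodup_ofList _
  set S := PySem.Set.ofList (sumKeys L (pairsList wood)) with hS
  set vals := PySem.Set.ofList wood with hvals
  -- distinct pairs in pairsList vals have distinct components
  have hdist : ∀ p ∈ pairsList vals, p.1 ≠ p.2 := by
    intro p hp
    have hsub := (mem_pairsList vals p).mp hp
    have := hsub.nodup hvnd
    simp [List.nodup_cons] at this
    exact fun h => this (h ▸ rfl)
  -- strict part
  have hstrict : S.countP (fun q => decide (q.1 < q.2))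
      = (pairsList vals).countP (fun p => decide (p.1 + p.2 = L)) := by
    rw [List.countP_eq_length_filter, List.countP_eq_length_filter]
    have hFnd : ((pairsList vals).filter (fun p => decide (p.1 + p.2 = L))).Nodup :=
      (pairsList_nodup hvnd).filter _
    have hMnd : (((pairsList vals).filter (fun p => decide (p.1 + p.2 = L))).map keyOf).Nodup := by
      refine List.Nodup.map_on ?_ hFnd
      intro p1 hp1 p2 hp2 hkey
      have hd1 := hdist p1 (List.mem_of_mem_filter hp1)
      have hd2 := hdist p2 (List.mem_of_mem_filter hp2)
      have hmin : min p1.1 p1.2 = min p2.1 p2.2 := congrArg Prod.fst hkey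
      have hmax : max p1.1 p1.2 = max p2.1 p2.2 := congrArg Prod.snd hkey
      have hcase : (p1.1 = p2.1 ∧ p1.2 = p2.2) ∨ (p1.1 = p2.2 ∧ p1.2 = p2.1) := by omega
      rcases hcase with ⟨h1, h2⟩ | ⟨h1, h2⟩
      · exact Prod.ext h1 h2
      · exfalso
        have hs1 := (mem_pairsList vals p1).mp (List.mem_of_mem_filter hp1)
        have hs2 := (mem_pairsList vals p2).mp (List.mem_of_mem_filter hp2)
        rw [← h1, ← h2] at hs2
        exact hd1 (sublist_pair_antisym hvnd hs1 hs2)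
    have hmemiff : ∀ q, q ∈ S.filter (fun q => decide (q.1 < q.2)) ↔
        q ∈ ((pairsList vals).filter (fun p => decide (p.1 + p.2 = L))).map keyOf := by
      intro q
      rw [List.mem_filter, List.mem_map]
      constructor
      · rintro ⟨hqS, hlt⟩
        have hlt' : q.1 < q.2 := of_decide_eq_true hlt
        obtain ⟨hle, hsum, hor⟩ := (mem_sumKeys_set wood L q).mp hqS
        have hne : q.1 ≠ q.2 := ne_of_lt hlt'
        have h1w : q.1 ∈ wood := by
          rcases hor with h | h
          · exact h.subset (by simp)
          · exact h.subset (by simp)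
        have h2w : q.2 ∈ wood := by
          rcases hor with h | h
          · exact h.subset (by simp)
          · exact h.subset (by simp)
        have h1v : q.1 ∈ vals := (PySem.Set.mem_ofList wood q.1).mpr h1w
        have h2v : q.2 ∈ vals := (PySem.Set.mem_ofList wood q.2).mpr h2w
        rcases pair_sublist_of_mem hne h1v h2v with hsv | hsv
        · refine ⟨(q.1, q.2), List.mem_filter.mpr ⟨(mem_pairsList vals (q.1, q.2)).mpr hsv, by simpa using hsum⟩, ?_⟩
          simp [keyOf, min_eq_left hle, max_eq_right hle]
        · refine ⟨(q.2, q.1), List.mem_filter.mpr ⟨(mem_pairsList vals (q.2, q.1)).mpr hsv, by simp; omega⟩, ?_⟩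
          simp [keyOf, min_eq_right hle, max_eq_left hle]
      · rintro ⟨p, hp, hkey⟩
        have hpm := List.mem_of_mem_filter hp
        have hsum : p.1 + p.2 = L := of_decide_eq_true (List.mem_filter.mp hp).2
        have hdp := hdist p hpm
        have hsubv := (mem_pairsList vals p).mp hpm
        have h1v : p.1 ∈ vals := hsubv.subset (by simp)
        have h2v : p.2 ∈ vals := hsubv.subset (by simp)
        have h1w : p.1 ∈ wood := (PySem.Set.mem_ofList wood p.1).mp h1v
        have h2w : p.2 ∈ wood := (PySem.Set.mem_ofList wood p.2).mp h2v
        have hqS : q ∈ S := by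
          rw [hS, mem_sumKeys_set]
          subst hkey
          refine ⟨min_le_max, by simp only [keyOf]; omega, ?_⟩
          rcases le_total p.1 p.2 with hle | hle
          · simpa [keyOf, min_eq_left hle, max_eq_right hle] using pair_sublist_of_mem hdp h1w h2w
          · simpa [keyOf, min_eq_right hle, max_eq_left hle] using pair_sublist_of_mem (Ne.symm hdp) h2w h1w
        refine ⟨hqS, ?_⟩
        subst hkey
        simp only [keyOf, decide_eq_true_eq]
        omega
    have hperm := (List.perm_ext_iff_of_nodup (hSnd.filter _) hMnd).mpr hmemiff
    rw [hperm.length_eq, List.length_map]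
  -- diagonal part
  have hdiag : S.countP (fun q => decide ¬(decide (q.1 < q.2) = true))
      = vals.countP (fun a => decide (2 * a = L) && decide (2 ≤ (PySem.Dict.counter wood).getD a 0)) := by
    have hcongr : S.countP (fun q => decide ¬(decide (q.1 < q.2) = true))
        = S.countP (fun q => decide (q.1 = q.2) && decide (q.1 + q.2 = L)) := by
      apply List.countP_congr
      intro q hq
      obtain ⟨hle, hsum, _⟩ := (mem_sumKeys_set wood L q).mp hq
      simp only [decide_eq_true_eq, Bool.and_eq_true]
      constructor
      · intro h; exact ⟨by omega, hsum⟩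
      · intro h; omega
    rw [hcongr]
    rw [countP_unique hSnd _ (by
      intro a b ha hb
      simp only [Bool.and_eq_true, decide_eq_true_eq] at ha hb
      have : a.1 = b.1 := by omega
      exact Prod.ext this (by omega))]
    rw [countP_unique hvnd _ (by
      intro a b ha hb
      simp only [Bool.and_eq_true, decide_eq_true_eq] at ha hb
      omega)]
    have hiff : (∃ q ∈ S, (decide (q.1 = q.2) && decide (q.1 + q.2 = L)) = true) ↔
        (∃ a ∈ vals, (decide (2 * a = L) && decide (2 ≤ (PySem.Dict.counter wood).getD a 0)) = true) := by
      constructor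
      · rintro ⟨⟨x, y⟩, hq, hpq⟩
        simp only [Bool.and_eq_true, decide_eq_true_eq] at hpq
        obtain ⟨heq, hsum⟩ := hpq
        subst heq
        obtain ⟨_, _, hor⟩ := (mem_sumKeys_set wood L (x, x)).mp hq
        have hsubl : [x, x].Sublist wood := by
          rcases hor with h | h <;> exact h
        have hcount : 2 ≤ wood.count x := by
          have h2 : (List.replicate 2 x).Sublist wood := by
            simpa [List.replicate] using hsubl
          exact List.replicate_sublist_iff.mp h2
        refine ⟨x, ?_, ?_⟩
        · exact (PySem.Set.mem_ofList wood x).mpr (List.count_pos_iff.mp (by omega))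
        · simp only [Bool.and_eq_true, decide_eq_true_eq, PySem.Dict.getD_counter]
          exact ⟨by omega, by exact_mod_cast hcount⟩
      · rintro ⟨a, ha, hpa⟩
        simp only [Bool.and_eq_true, decide_eq_true_eq, PySem.Dict.getD_counter] at hpa
        obtain ⟨hL2, hcnt⟩ := hpa
        have hcount : 2 ≤ wood.count a := by exact_mod_cast hcnt
        have hsubl : [a, a].Sublist wood := by
          have h2 := (List.replicate_sublist_iff (n := 2) (a := a) (l := wood)).mpr hcount
          simpa [List.replicate] using h2
        have hsumaa : a + a = L := by omega
        refine ⟨(a, a), (mem_sumKeys_set wood L (a, a)).mpr ⟨le_refl a, by simpa using hsumaa, Or.inl hsubl⟩, ?_⟩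
        simp [hsumaa]
    exact if_congr hiff rfl rfl
  rw [count_bKeys]
  have hlen := List.length_eq_countP_add_countP (fun q : Int × Int => decide (q.1 < q.2)) (l := S)
  rw [hlen, hstrict, hdiag]
  push_cast
  ring

theorem counterA_eq (wood : List Int) :
    wood.foldl (fun d length =>
        if d.contains length then d.modify length 0 (· + 1) else d.insert length 1)
      PySem.Dict.empty = PySem.Dict.counter wood := by
  have hf : (fun (d : PySem.Dict Int Int) (length : Int) =>
      if d.contains length then d.modify length 0 (· + 1) else d.insert length 1)
      = (fun (d : PySem.Dict Int Int) (x : Int) => d.modify x 0 (· + 1)) := by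
    funext d x
    by_cases h : d.contains x = true
    · rw [if_pos h]
    · rw [if_neg h]
      unfold PySem.Dict.modify
      rw [PySem.Dict.getD_of_not_contains _ _ (by simpa using h)]
      norm_num
  rw [hf]
  rfl

theorem fold_pairs_zero {α σ : Type} (l : List α) (dflt : α) (h : σ → α → σ)
    (g : σ → α → α → σ) (s : σ) :
    (PySem.List.pyRange 0 (PySem.List.len l)).foldl
      (fun st i => (PySem.List.pyRange (i + 1) (PySem.List.len l)).foldl
        (fun st j => g st (PySem.List.pyGetD l i dflt) (PySem.List.pyGetD l j dflt))
        (h st (PySem.List.pyGetD l i dflt))) s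
      = pairFold h g l s := by
  have hz := fold_pyRange_pairs l dflt h g 0 s
  simpa using hz

theorem fold_pairs_B (cnt : PySem.Dict Int Int) (vals : List Int) (s : PySem.Dict Int Int) :
    (PySem.List.pyRange 0 (PySem.List.len vals)).foldl (fun d i =>
        (PySem.List.pyRange (i + 1) (PySem.List.len vals)).foldl (fun d j =>
            d.insert (PySem.List.pyGetD vals i 0 + PySem.List.pyGetD vals j 0)
              (d.getD (PySem.List.pyGetD vals i 0 + PySem.List.pyGetD vals j 0) 0 + 1))
          (if cnt.getD (PySem.List.pyGetD vals i 0) 0 ≥ 2 then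
            d.insert (2 * PySem.List.pyGetD vals i 0)
              (d.getD (2 * PySem.List.pyGetD vals i 0) 0 + 1)
          else d)) s
      = pairFold
          (fun d a => if cnt.getD a 0 ≥ 2 then d.insert (2 * a) (d.getD (2 * a) 0 + 1) else d)
          (fun d a y => d.insert (a + y) (d.getD (a + y) 0 + 1)) vals s :=
  fold_pairs_zero vals 0
    (fun d a => if cnt.getD a 0 ≥ 2 then d.insert (2 * a) (d.getD (2 * a) 0 + 1) else d)
    (fun d a y => d.insert (a + y) (d.getD (a + y) 0 + 1)) s

-- ===== VERDICT (by name: the statement is the Claim_ definition above) =====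
theorem max_planks_spec : Claim_equal_max_planks := by
  intro wood _
  unfold Spec_max_planks max_planks max_planks_alt
  simp only [counterA_eq, PySem.Dict.foldl_insert_getD_add_one_eq_counter, PySem.Dict.keys_counter]
  apply PySem.List.foldl_congr_mem
  intro acc L hL
  congr 1
  -- A side
  rw [fold_pairs_zero wood 0 (fun st _ => st)
      (fun st x y => if x + y = L then
          (if PySem.Set.contains st.2 (min x y, max x y) then st
           else (st.1 + 1, PySem.Set.add st.2 (min x y, max x y)))
        else st)]
  rw [pairFold_eq_foldl_pairsList]
  rw [addnew]
  -- B side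
  rw [fold_pairs_B (PySem.Dict.counter wood) (PySem.Set.ofList wood)]
  rw [bFold_getD]
  have hupd : PySem.Set.update (PySem.Set.empty) (sumKeys L (pairsList wood))
      = PySem.Set.ofList (sumKeys L (pairsList wood)) := by
    rw [PySem.Set.ofList_eq_foldl]; rfl
  rw [hupd, PySem.Dict.getD_empty]
  rw [perL wood L]
  simp [PySem.Set.empty]
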